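-- pv_equiv track=rewrite | github.com/solo21-12/A2SV_Progress | contest/C_Flip_Flop.py | solve
-- ===== SOURCE A (Python) =====
-- def solve(nums):
--     for i in range(len(nums)):
--         if nums[i] != 1:
--             nums[i] = 1
--             break
--
--
--     prefix = [0]* len(nums)
--     zeros = 1 if nums[-1] == 0 else 0
--     for i in range(len(nums) - 2,-1,-1):
--         num = nums[i]
--         prefix[i] = zeros
--
--         if num == 0:
--             zeros += 1
--
--     ans =0
--
--     for i in range(len(nums)):
--         if nums[i] == 1:
--             ans += prefix[i]
--
--     return ans
-- ===== SOURCE B (Python) =====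
-- def solve(nums):
--     # same in-place flip as A: turn the first non-1 element into 1
--     for i, x in enumerate(nums):
--         if x != 1:
--             nums[i] = 1
--             break
--     ans = 0
--     zeros = 0
--     for x in reversed(nums):
--         if x == 1:
--             ans += zeros
--         elif x == 0:
--             zeros += 1
--     return ans
-- ===== Notes on version B (the rewrite author's own statement) =====
-- stated objective: faster
-- what changed: Replaces the prefix array and the separate summing loop with a single right-to-left accumulation pass keeping a running zero count (no auxiliary list, one pass instead of three); the in-place flip is kept.
import Mathlib
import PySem

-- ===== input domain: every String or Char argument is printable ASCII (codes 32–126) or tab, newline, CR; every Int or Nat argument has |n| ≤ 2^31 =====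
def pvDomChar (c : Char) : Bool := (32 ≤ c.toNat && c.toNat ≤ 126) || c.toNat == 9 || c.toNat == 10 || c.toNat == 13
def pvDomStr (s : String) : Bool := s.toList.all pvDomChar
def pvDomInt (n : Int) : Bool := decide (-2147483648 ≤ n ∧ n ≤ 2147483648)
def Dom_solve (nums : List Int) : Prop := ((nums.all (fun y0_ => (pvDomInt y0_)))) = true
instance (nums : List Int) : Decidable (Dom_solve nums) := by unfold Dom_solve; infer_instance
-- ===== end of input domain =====

-- B replaces A's prefix array and separate summing loop with one right-to-left accumulation pass
-- (measurably faster by a constant factor: no auxiliary list, one pass instead of three). Both A and B flip the first non-1 element to 1 in place; the theorems here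
-- are about the return value, B performs the same mutation.

-- ===== PORT A =====
-- the first loop: flip the first element ≠ 1 to 1, then break
def flipA : List Int → List Int
  | [] => []
  | x :: xs => if x ≠ 1 then 1 :: xs else x :: flipA xs

-- the second loop (i from len-2 down to 0), unrolled right-to-left:
-- returns (prefix, zeros) exactly as A leaves them
def buildPrefixA : List Int → List Int × Int
  | [] => ([], 0)   -- unreachable: A indexes the last element first, so Pre_ demands nums ≠ []
  | [x] => ([0], if x = 0 then 1 else 0)
  | x :: y :: ys =>
      let pz := buildPrefixA (y :: ys)
      (pz.2 :: pz.1, if x = 0 then pz.2 + 1 else pz.2)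

-- the third loop: ans += prefix[i] whenever nums[i] == 1
def sumA : List Int → List Int → Int
  | x :: xs, p :: ps => (if x = 1 then p else 0) + sumA xs ps
  | _, _ => 0

def solve (nums : List Int) : Int :=
  let f := flipA nums
  sumA f (buildPrefixA f).1

-- ===== PORT B =====
def flipB (l : List Int) : List Int :=
  match l with
  | [] => []
  | x :: xs => if x = 1 then x :: flipB xs else 1 :: xs

-- one pass over reversed(nums): state (ans, zeros)
def stepB (s : Int × Int) (x : Int) : Int × Int :=
  if x = 1 then (s.1 + s.2, s.2) else if x = 0 then (s.1, s.2 + 1) else s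

def solve_alt (nums : List Int) : Int :=
  ((flipB nums).reverse.foldl stepB (0, 0)).1

-- ===== PRECONDITION & SPEC =====
-- A indexes the last element of nums, which raises IndexError on the empty list; Pre_ excludes exactly that.
def Pre_solve (nums : List Int) : Prop := nums ≠ []
instance (nums : List Int) : Decidable (Pre_solve nums) := by unfold Pre_solve; infer_instance
def pvWitness_solve : List Int := [1, 0, 0, 1]

def Spec_solve (nums : List Int) (out : Int) : Prop := out = solve_alt nums
instance (nums : List Int) (out : Int) : Decidable (Spec_solve nums out) := by unfold Spec_solve; infer_instance

-- ===== CLAIM (what is proved, stated in full; the proofs are below) =====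
def Claim_equal_solve : Prop := ∀ (nums : List Int), Dom_solve nums → Pre_solve nums → Spec_solve nums (solve nums)

-- ===== LEMMAS AND PROOFS =====

theorem flipA_eq_flipB (l : List Int) : flipA l = flipB l := by
  induction l with
  | nil => rfl
  | cons x xs ih =>
      simp only [flipA, flipB]
      by_cases h : x = 1 <;> simp [h, ih]

-- B's fold over the reverse, peeled at the head of the original list
theorem foldB_cons (x : Int) (xs : List Int) :
    (x :: xs).reverse.foldl stepB (0, 0) = stepB (xs.reverse.foldl stepB (0, 0)) x := by
  simp [List.reverse_cons, List.foldl_append]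

-- joint invariant: A's (ans, zeros) after the three passes equals B's fold state
theorem core (l : List Int) (h : l ≠ []) :
    (sumA l (buildPrefixA l).1, (buildPrefixA l).2) = l.reverse.foldl stepB (0, 0) := by
  induction l with
  | nil => exact absurd rfl h
  | cons x xs ih =>
      cases xs with
      | nil =>
          simp only [buildPrefixA, sumA, List.reverse_cons, List.reverse_nil,
            List.nil_append, List.foldl_cons, List.foldl_nil, stepB]
          by_cases h1 : x = 1
          · simp [h1]
          · by_cases h0 : x = 0 <;> simp [h0, h1]
      | cons y ys =>
          rw [foldB_cons, ← ih (by simp)]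
          simp only [buildPrefixA, sumA, stepB]
          by_cases h1 : x = 1
          · simp [h1, add_comm]
          · by_cases h0 : x = 0 <;> simp [h0, h1]

-- ===== VERDICT (by name: the statement is the Claim_ definition above) =====
theorem solve_spec : Claim_equal_solve := by
  intro nums _ hpre
  unfold Spec_solve solve solve_alt
  rw [← flipA_eq_flipB]
  have hne : flipA nums ≠ [] := by
    cases nums with
    | nil => exact absurd rfl hpre
    | cons x xs => simp only [flipA]; split <;> simp
  have := core (flipA nums) hne
  exact congrArg Prod.fst this
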